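-- pv_equiv track=rewrite | github.com/dplatsas/DataCentricProgramming_Dima | LabWeek5.py | parse_tune
-- ===== SOURCE A (Python) =====
-- def parse_tune(tune_lines):
--     """Parse a single tune from lines"""
--     tune = {
--         'X': None,
--         'title': None,
--         'alt_title': None,
--         'tune_type': None,
--         'key': None,
--         'notation': '\n'.join(tune_lines)
--     }
--
--     title_count = 0
--
--     for line in tune_lines:
--         line = line.strip()
--
--         if line.startswith('X:'):
--             tune['X'] = line[2:].strip()
--
--         elif line.startswith('T:'):
--             if title_count == 0:
--                 tune['title'] = line[2:].strip()
--                 title_count += 1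
--             elif title_count == 1:
--                 tune['alt_title'] = line[2:].strip()
--                 title_count += 1
--
--         elif line.startswith('R:'):
--             tune['tune_type'] = line[2:].strip()
--
--         elif line.startswith('K:'):
--             tune['key'] = line[2:].strip()
--
--     return tune
-- ===== SOURCE B (Python) =====
-- def parse_tune(tune_lines):
--     """Parse a single tune from lines (two-pass: group values by 2-char prefix, then read fields)"""
--     groups = {'X:': [], 'T:': [], 'R:': [], 'K:': []}
--     for line in tune_lines:
--         s = line.strip()
--         if s[:2] in groups:
--             groups[s[:2]].append(s[2:].strip())
--     titles = groups['T:']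
--     return {
--         'X': groups['X:'][-1] if groups['X:'] else None,
--         'title': titles[0] if titles else None,
--         'alt_title': titles[1] if len(titles) > 1 else None,
--         'tune_type': groups['R:'][-1] if groups['R:'] else None,
--         'key': groups['K:'][-1] if groups['K:'] else None,
--         'notation': '\n'.join(tune_lines),
--     }
-- ===== Notes on version B (the rewrite author's own statement) =====
-- stated objective: alternative
-- what changed: Replaces A's inline if/elif per-line field assignments plus a title counter with a two-pass decomposition: first group each stripped line's value under its two-char prefix in a dict of lists, then read each field (last value for X/R/K, first and second T values for title/alt_title) off that table.
import Mathlib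
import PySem

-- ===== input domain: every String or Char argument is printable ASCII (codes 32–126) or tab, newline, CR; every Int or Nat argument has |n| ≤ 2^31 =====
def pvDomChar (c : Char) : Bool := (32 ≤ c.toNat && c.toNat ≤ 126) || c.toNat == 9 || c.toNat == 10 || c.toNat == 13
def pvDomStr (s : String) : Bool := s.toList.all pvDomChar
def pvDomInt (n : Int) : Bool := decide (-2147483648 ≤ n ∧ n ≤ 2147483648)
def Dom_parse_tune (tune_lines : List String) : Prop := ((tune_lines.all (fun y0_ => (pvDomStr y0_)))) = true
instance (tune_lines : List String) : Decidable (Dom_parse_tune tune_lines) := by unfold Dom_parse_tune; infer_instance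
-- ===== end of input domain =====

-- B replaces A's inline if/elif field assignments by a two-pass decomposition (group values
-- by their two-char prefix into a table, then read each field off the table); objective:
-- alternative decomposition, same cost.

-- ===== PORT A =====
-- the fixed-key dict A builds is ported as a record of its five mutable fields
-- ('notation' is set once and never touched, so it is re-attached at the end)
structure PvTuneA where
  x : Option String
  title : Option String
  altTitle : Option String
  tuneType : Option String
  key : Option String
deriving Repr, DecidableEq

def pvStepA (st : PvTuneA × Nat) (line : String) : PvTuneA × Nat :=
  let tune := st.1
  let tc := st.2
  let l := PySem.Str.strip line
  if PySem.Str.startswith l "X:" then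
    ({ tune with x := some (PySem.Str.strip (PySem.Str.slice l (some 2) none)) }, tc)
  else if PySem.Str.startswith l "T:" then
    if tc = 0 then ({ tune with title := some (PySem.Str.strip (PySem.Str.slice l (some 2) none)) }, tc + 1)
    else if tc = 1 then ({ tune with altTitle := some (PySem.Str.strip (PySem.Str.slice l (some 2) none)) }, tc + 1)
    else (tune, tc)
  else if PySem.Str.startswith l "R:" then
    ({ tune with tuneType := some (PySem.Str.strip (PySem.Str.slice l (some 2) none)) }, tc)
  else if PySem.Str.startswith l "K:" then
    ({ tune with key := some (PySem.Str.strip (PySem.Str.slice l (some 2) none)) }, tc)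
  else (tune, tc)

def parse_tune (tune_lines : List String) : List (String × Option String) :=
  let fin := tune_lines.foldl pvStepA (⟨none, none, none, none, none⟩, 0)
  [("X", fin.1.x), ("title", fin.1.title), ("alt_title", fin.1.altTitle),
   ("tune_type", fin.1.tuneType), ("key", fin.1.key),
   ("notation", some (PySem.Str.join "\n" tune_lines))]

-- ===== PORT B =====
def pvStepB (g : PySem.Dict String (List String)) (line : String) : PySem.Dict String (List String) :=
  let s := PySem.Str.strip line
  let p := PySem.Str.slice s none (some 2)
  if g.contains p then g.modify p [] (fun vs => vs ++ [PySem.Str.strip (PySem.Str.slice s (some 2) none)])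
  else g

def parse_tune_alt (tune_lines : List String) : List (String × Option String) :=
  let groups := tune_lines.foldl pvStepB
    (PySem.Dict.ofList [("X:", []), ("T:", []), ("R:", []), ("K:", [])])
  let ts := groups.getD "T:" []
  [("X", (groups.getD "X:" []).getLast?),
   ("title", ts[0]?),
   ("alt_title", ts[1]?),
   ("tune_type", (groups.getD "R:" []).getLast?),
   ("key", (groups.getD "K:" []).getLast?),
   ("notation", some (PySem.Str.join "\n" tune_lines))]

-- ===== PRECONDITION & SPEC =====
def Spec_parse_tune (tune_lines : List String) (out : List (String × Option String)) : Prop := out = parse_tune_alt tune_lines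
instance (tune_lines : List String) (out : List (String × Option String)) : Decidable (Spec_parse_tune tune_lines out) := by unfold Spec_parse_tune; infer_instance

-- ===== CLAIM (what is proved, stated in full; the proofs are below) =====
def Claim_equal_parse_tune : Prop := ∀ (tune_lines : List String), Dom_parse_tune tune_lines → Spec_parse_tune tune_lines (parse_tune tune_lines)

-- ===== LEMMAS AND PROOFS =====

-- A two-char startswith test is a condition on the first two characters
lemma pv_sw (s p : String) (c1 c2 : Char) (hp : p.toList = [c1, c2]) :
    PySem.Str.startswith s p = true ↔ s.toList.take 2 = [c1, c2] := by
  rw [PySem.Str.startswith_eq, hp, PySem.Chars.startswith_iff, List.prefix_iff_eq_take]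
  simp [eq_comm]

lemma pv_slice2 (s : String) :
    (PySem.Str.slice s none (some 2)).toList = s.toList.take 2 := by
  rw [PySem.Str.toList_slice, PySem.Chars.slice_eq_listSlice]
  norm_num [PySem.List.slice_to]
  rfl

lemma pv_loop (lines : List String) : ∀ (gx gt gr gk : List String),
    ∃ gx' gt' gr' gk',
      lines.foldl pvStepB (PySem.Dict.mk [("X:", gx), ("T:", gt), ("R:", gr), ("K:", gk)])
        = PySem.Dict.mk [("X:", gx'), ("T:", gt'), ("R:", gr'), ("K:", gk')]
      ∧ lines.foldl pvStepA (⟨gx.getLast?, gt[0]?, gt[1]?, gr.getLast?, gk.getLast?⟩, min gt.length 2)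
        = (⟨gx'.getLast?, gt'[0]?, gt'[1]?, gr'.getLast?, gk'.getLast?⟩, min gt'.length 2) := by
  induction lines with
  | nil => exact fun gx gt gr gk => ⟨gx, gt, gr, gk, rfl, rfl⟩
  | cons line rest ih =>
    intro gx gt_ gr gk
    simp only [List.foldl_cons]
    have hp : (PySem.Str.slice (PySem.Str.strip line) none (some 2)).toList
        = (PySem.Str.strip line).toList.take 2 := pv_slice2 _
    by_cases hX : (PySem.Str.strip line).toList.take 2 = ['X', ':']
    · have hpe : PySem.Str.slice (PySem.Str.strip line) none (some 2) = "X:" :=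
        String.toList_inj.mp (by rw [hp, hX]; rfl)
      have hBs : pvStepB (PySem.Dict.mk [("X:", gx), ("T:", gt_), ("R:", gr), ("K:", gk)]) line
          = PySem.Dict.mk [("X:", gx ++ [PySem.Str.strip (PySem.Str.slice (PySem.Str.strip line) (some 2) none)]), ("T:", gt_), ("R:", gr), ("K:", gk)] := by
        simp only [pvStepB, hpe]
        simp [PySem.Dict.contains, PySem.Dict.modify, PySem.Dict.insert, PySem.Dict.getD, PySem.Dict.get?]
      have hAs : pvStepA (⟨gx.getLast?, gt_[0]?, gt_[1]?, gr.getLast?, gk.getLast?⟩, min gt_.length 2) line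
          = (⟨(gx ++ [PySem.Str.strip (PySem.Str.slice (PySem.Str.strip line) (some 2) none)]).getLast?, gt_[0]?, gt_[1]?, gr.getLast?, gk.getLast?⟩, min gt_.length 2) := by
        simp only [pvStepA]
        rw [if_pos ((pv_sw _ _ 'X' ':' rfl).mpr hX)]
        simp
      rw [hBs, hAs]; exact ih (gx ++ [PySem.Str.strip (PySem.Str.slice (PySem.Str.strip line) (some 2) none)]) gt_ gr gk
    · have nX : ¬ (PySem.Str.startswith (PySem.Str.strip line) "X:" = true) :=
        fun h => hX ((pv_sw _ _ 'X' ':' rfl).mp h)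
      by_cases hT : (PySem.Str.strip line).toList.take 2 = ['T', ':']
      · rcases gt_ with _ | ⟨a, _ | ⟨b, gt2⟩⟩
        · have hpe : PySem.Str.slice (PySem.Str.strip line) none (some 2) = "T:" :=
            String.toList_inj.mp (by rw [hp, hT]; rfl)
          have hBs : pvStepB (PySem.Dict.mk [("X:", gx), ("T:", ([] : List String)), ("R:", gr), ("K:", gk)]) line
              = PySem.Dict.mk [("X:", gx), ("T:", [PySem.Str.strip (PySem.Str.slice (PySem.Str.strip line) (some 2) none)]), ("R:", gr), ("K:", gk)] := by
            simp only [pvStepB, hpe]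
            simp [PySem.Dict.contains, PySem.Dict.modify, PySem.Dict.insert, PySem.Dict.getD, PySem.Dict.get?]
          have hAs : pvStepA (⟨gx.getLast?, ([] : List String)[0]?, ([] : List String)[1]?, gr.getLast?, gk.getLast?⟩, min ([] : List String).length 2) line
              = (⟨gx.getLast?, [PySem.Str.strip (PySem.Str.slice (PySem.Str.strip line) (some 2) none)][0]?, [PySem.Str.strip (PySem.Str.slice (PySem.Str.strip line) (some 2) none)][1]?, gr.getLast?, gk.getLast?⟩, min ([PySem.Str.strip (PySem.Str.slice (PySem.Str.strip line) (some 2) none)]).length 2) := by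
            simp only [pvStepA]
            rw [if_neg nX, if_pos ((pv_sw _ _ 'T' ':' rfl).mpr hT)]
            simp
          rw [hBs, hAs]; exact ih gx ([PySem.Str.strip (PySem.Str.slice (PySem.Str.strip line) (some 2) none)]) gr gk
        · have hpe : PySem.Str.slice (PySem.Str.strip line) none (some 2) = "T:" :=
            String.toList_inj.mp (by rw [hp, hT]; rfl)
          have hBs : pvStepB (PySem.Dict.mk [("X:", gx), ("T:", [a]), ("R:", gr), ("K:", gk)]) line
              = PySem.Dict.mk [("X:", gx), ("T:", [a, PySem.Str.strip (PySem.Str.slice (PySem.Str.strip line) (some 2) none)]), ("R:", gr), ("K:", gk)] := by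
            simp only [pvStepB, hpe]
            simp [PySem.Dict.contains, PySem.Dict.modify, PySem.Dict.insert, PySem.Dict.getD, PySem.Dict.get?]
          have hAs : pvStepA (⟨gx.getLast?, [a][0]?, [a][1]?, gr.getLast?, gk.getLast?⟩, min [a].length 2) line
              = (⟨gx.getLast?, [a, PySem.Str.strip (PySem.Str.slice (PySem.Str.strip line) (some 2) none)][0]?, [a, PySem.Str.strip (PySem.Str.slice (PySem.Str.strip line) (some 2) none)][1]?, gr.getLast?, gk.getLast?⟩, min ([a, PySem.Str.strip (PySem.Str.slice (PySem.Str.strip line) (some 2) none)]).length 2) := by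
            simp only [pvStepA]
            rw [if_neg nX, if_pos ((pv_sw _ _ 'T' ':' rfl).mpr hT)]
            simp
          rw [hBs, hAs]; exact ih gx ([a, PySem.Str.strip (PySem.Str.slice (PySem.Str.strip line) (some 2) none)]) gr gk
        · have hpe : PySem.Str.slice (PySem.Str.strip line) none (some 2) = "T:" :=
            String.toList_inj.mp (by rw [hp, hT]; rfl)
          have hBs : pvStepB (PySem.Dict.mk [("X:", gx), ("T:", (a :: b :: gt2)), ("R:", gr), ("K:", gk)]) line
              = PySem.Dict.mk [("X:", gx), ("T:", a :: b :: (gt2 ++ [PySem.Str.strip (PySem.Str.slice (PySem.Str.strip line) (some 2) none)])), ("R:", gr), ("K:", gk)] := by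
            simp only [pvStepB, hpe]
            simp [PySem.Dict.contains, PySem.Dict.modify, PySem.Dict.insert, PySem.Dict.getD, PySem.Dict.get?]
          have hAs : pvStepA (⟨gx.getLast?, (a :: b :: gt2)[0]?, (a :: b :: gt2)[1]?, gr.getLast?, gk.getLast?⟩, min (a :: b :: gt2).length 2) line
              = (⟨gx.getLast?, (a :: b :: (gt2 ++ [PySem.Str.strip (PySem.Str.slice (PySem.Str.strip line) (some 2) none)]))[0]?, (a :: b :: (gt2 ++ [PySem.Str.strip (PySem.Str.slice (PySem.Str.strip line) (some 2) none)]))[1]?, gr.getLast?, gk.getLast?⟩, min (a :: b :: (gt2 ++ [PySem.Str.strip (PySem.Str.slice (PySem.Str.strip line) (some 2) none)])).length 2) := by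
            simp only [pvStepA]
            rw [if_neg nX, if_pos ((pv_sw _ _ 'T' ':' rfl).mpr hT)]
            simp
          rw [hBs, hAs]; exact ih gx (a :: b :: (gt2 ++ [PySem.Str.strip (PySem.Str.slice (PySem.Str.strip line) (some 2) none)])) gr gk
      · have nT : ¬ (PySem.Str.startswith (PySem.Str.strip line) "T:" = true) :=
          fun h => hT ((pv_sw _ _ 'T' ':' rfl).mp h)
        by_cases hR : (PySem.Str.strip line).toList.take 2 = ['R', ':']
        · have hpe : PySem.Str.slice (PySem.Str.strip line) none (some 2) = "R:" :=
            String.toList_inj.mp (by rw [hp, hR]; rfl)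
          have hBs : pvStepB (PySem.Dict.mk [("X:", gx), ("T:", gt_), ("R:", gr), ("K:", gk)]) line
              = PySem.Dict.mk [("X:", gx), ("T:", gt_), ("R:", gr ++ [PySem.Str.strip (PySem.Str.slice (PySem.Str.strip line) (some 2) none)]), ("K:", gk)] := by
            simp only [pvStepB, hpe]
            simp [PySem.Dict.contains, PySem.Dict.modify, PySem.Dict.insert, PySem.Dict.getD, PySem.Dict.get?]
          have hAs : pvStepA (⟨gx.getLast?, gt_[0]?, gt_[1]?, gr.getLast?, gk.getLast?⟩, min gt_.length 2) line
              = (⟨gx.getLast?, gt_[0]?, gt_[1]?, (gr ++ [PySem.Str.strip (PySem.Str.slice (PySem.Str.strip line) (some 2) none)]).getLast?, gk.getLast?⟩, min gt_.length 2) := by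
            simp only [pvStepA]
            rw [if_neg nX, if_neg nT, if_pos ((pv_sw _ _ 'R' ':' rfl).mpr hR)]
            simp
          rw [hBs, hAs]; exact ih gx gt_ (gr ++ [PySem.Str.strip (PySem.Str.slice (PySem.Str.strip line) (some 2) none)]) gk
        · have nR : ¬ (PySem.Str.startswith (PySem.Str.strip line) "R:" = true) :=
            fun h => hR ((pv_sw _ _ 'R' ':' rfl).mp h)
          by_cases hK : (PySem.Str.strip line).toList.take 2 = ['K', ':']
          · have hpe : PySem.Str.slice (PySem.Str.strip line) none (some 2) = "K:" :=
              String.toList_inj.mp (by rw [hp, hK]; rfl)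
            have hBs : pvStepB (PySem.Dict.mk [("X:", gx), ("T:", gt_), ("R:", gr), ("K:", gk)]) line
                = PySem.Dict.mk [("X:", gx), ("T:", gt_), ("R:", gr), ("K:", gk ++ [PySem.Str.strip (PySem.Str.slice (PySem.Str.strip line) (some 2) none)])] := by
              simp only [pvStepB, hpe]
              simp [PySem.Dict.contains, PySem.Dict.modify, PySem.Dict.insert, PySem.Dict.getD, PySem.Dict.get?]
            have hAs : pvStepA (⟨gx.getLast?, gt_[0]?, gt_[1]?, gr.getLast?, gk.getLast?⟩, min gt_.length 2) line
                = (⟨gx.getLast?, gt_[0]?, gt_[1]?, gr.getLast?, (gk ++ [PySem.Str.strip (PySem.Str.slice (PySem.Str.strip line) (some 2) none)]).getLast?⟩, min gt_.length 2) := by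
              simp only [pvStepA]
              rw [if_neg nX, if_neg nT, if_neg nR, if_pos ((pv_sw _ _ 'K' ':' rfl).mpr hK)]
              simp
            rw [hBs, hAs]; exact ih gx gt_ gr (gk ++ [PySem.Str.strip (PySem.Str.slice (PySem.Str.strip line) (some 2) none)])
          · have nK : ¬ (PySem.Str.startswith (PySem.Str.strip line) "K:" = true) :=
              fun h => hK ((pv_sw _ _ 'K' ':' rfl).mp h)
            have pX : PySem.Str.slice (PySem.Str.strip line) none (some 2) ≠ "X:" :=
              fun h => hX (by rw [← hp, h]; rfl)
            have pT : PySem.Str.slice (PySem.Str.strip line) none (some 2) ≠ "T:" :=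
              fun h => hT (by rw [← hp, h]; rfl)
            have pR : PySem.Str.slice (PySem.Str.strip line) none (some 2) ≠ "R:" :=
              fun h => hR (by rw [← hp, h]; rfl)
            have pK : PySem.Str.slice (PySem.Str.strip line) none (some 2) ≠ "K:" :=
              fun h => hK (by rw [← hp, h]; rfl)
            have hBs : pvStepB (PySem.Dict.mk [("X:", gx), ("T:", gt_), ("R:", gr), ("K:", gk)]) line
                = PySem.Dict.mk [("X:", gx), ("T:", gt_), ("R:", gr), ("K:", gk)] := by
              simp only [pvStepB]
              simp [PySem.Dict.contains, Ne.symm pX, Ne.symm pT, Ne.symm pR, Ne.symm pK]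
            have hAs : pvStepA (⟨gx.getLast?, gt_[0]?, gt_[1]?, gr.getLast?, gk.getLast?⟩, min gt_.length 2) line
                = (⟨gx.getLast?, gt_[0]?, gt_[1]?, gr.getLast?, gk.getLast?⟩, min gt_.length 2) := by
              simp only [pvStepA]
              rw [if_neg nX, if_neg nT, if_neg nR, if_neg nK]
            rw [hBs, hAs]; exact ih gx gt_ gr gk

-- ===== VERDICT (by name: the statement is the Claim_ definition above) =====
theorem parse_tune_spec : Claim_equal_parse_tune := by
  intro lines _
  show parse_tune lines = parse_tune_alt lines
  obtain ⟨gx', gt', gr', gk', hB, hA⟩ := pv_loop lines [] [] [] []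
  unfold parse_tune parse_tune_alt
  rw [show (PySem.Dict.ofList [("X:", ([] : List String)), ("T:", []), ("R:", []), ("K:", [])])
      = PySem.Dict.mk [("X:", []), ("T:", []), ("R:", []), ("K:", [])] from by decide]
  rw [hB]
  have hA' : List.foldl pvStepA (⟨none, none, none, none, none⟩, 0) lines
      = (⟨gx'.getLast?, gt'[0]?, gt'[1]?, gr'.getLast?, gk'.getLast?⟩, min gt'.length 2) := by
    simpa using hA
  rw [hA']
  simp [PySem.Dict.getD, PySem.Dict.get?]
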